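-- pv_equiv track=rewrite | github.com/rabia-sarfaraz/leet-code | 1503-reducing-dishes/reducing-dishes.py | maxSatisfaction
-- ===== SOURCE A (Python) =====
-- def maxSatisfaction(satisfaction):
--     satisfaction.sort()
--
--     total = 0      # running sum
--     result = 0     # final answer
--
--     # traverse from right (largest values)
--     for i in range(len(satisfaction) - 1, -1, -1):
--         total += satisfaction[i]
--
--         if total > 0:
--             result += total
--         else:
--             break
--
--     return result
-- ===== SOURCE B (Python) =====
-- def maxSatisfaction(satisfaction):
--     satisfaction.sort()
--     n = len(satisfaction)
--     best = 0
--     for i in range(n):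
--         t = 0
--         for j, v in enumerate(satisfaction[i:]):
--             t += (j + 1) * v
--         if t > best:
--             best = t
--     return best
-- ===== Notes on version B (the rewrite author's own statement) =====
-- stated objective: alternative
-- what changed: B replaces A's right-to-left greedy running-sum loop with break by an explicit evaluation of the weighted objective sum((j+1)*s[i+j]) for every suffix start i of the sorted list, keeping the running maximum (0 allows taking nothing).
import Mathlib
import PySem

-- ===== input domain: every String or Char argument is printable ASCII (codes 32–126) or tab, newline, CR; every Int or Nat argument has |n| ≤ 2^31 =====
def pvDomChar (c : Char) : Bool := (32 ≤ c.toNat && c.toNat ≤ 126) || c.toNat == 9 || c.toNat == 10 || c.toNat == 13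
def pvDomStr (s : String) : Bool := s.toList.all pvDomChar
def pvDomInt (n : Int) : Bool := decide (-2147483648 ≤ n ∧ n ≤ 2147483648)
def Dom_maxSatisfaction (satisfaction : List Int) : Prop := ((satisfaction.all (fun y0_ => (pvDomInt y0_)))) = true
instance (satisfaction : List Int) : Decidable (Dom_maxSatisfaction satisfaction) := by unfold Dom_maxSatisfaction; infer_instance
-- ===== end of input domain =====

-- B evaluates the weighted objective of every sorted suffix and keeps the maximum, instead of
-- A's greedy suffix-running-sum with break; equivalence proved on the return value (both Pythons
-- sort the argument in place, the same mutation).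

-- ===== PORT A =====
-- the for-loop with break, recursing over the countdown index list; every visited index is in
-- range, so pyGetD is exact here
def pvALoop (s : List Int) : List Int → Int → Int → Int
  | [], _, result => result
  | i :: is, total, result =>
      let total' := total + PySem.List.pyGetD s i 0
      if total' > 0 then pvALoop s is total' (result + total') else result

def maxSatisfaction (satisfaction : List Int) : Int :=
  let s := PySem.List.sorted satisfaction (fun x => x) false
  pvALoop s (PySem.List.pyRange ((s.length : Int) - 1) (-1) (-1)) 0 0

-- ===== PORT B =====
-- inner loop: t += (j + 1) * v over enumerate(l[i:])
def pvWLoop (l : List Int) : Int :=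
  (PySem.List.enumerate l 0).foldl (fun t jv => t + (jv.1 + 1) * jv.2) 0

def maxSatisfaction_alt (satisfaction : List Int) : Int :=
  let l := PySem.List.sorted satisfaction (fun x => x) false
  (PySem.List.pyRange 0 (l.length : Int) 1).foldl
    (fun best i =>
      let t := pvWLoop (PySem.List.slice l (some i) none)
      if t > best then t else best) 0

-- ===== PRECONDITION & SPEC =====
def Spec_maxSatisfaction (satisfaction : List Int) (out : Int) : Prop := out = maxSatisfaction_alt satisfaction
instance (satisfaction : List Int) (out : Int) : Decidable (Spec_maxSatisfaction satisfaction out) := by unfold Spec_maxSatisfaction; infer_instance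

-- ===== CLAIM (what is proved, stated in full; the proofs are below) =====
def Claim_equal_maxSatisfaction : Prop := ∀ (satisfaction : List Int), Dom_maxSatisfaction satisfaction → Spec_maxSatisfaction satisfaction (maxSatisfaction satisfaction)

-- ===== LEMMAS AND PROOFS =====

-- A's loop, structurally over the reversed list
def pvGreedy : List Int → Int → Int → Int
  | [], _, f => f
  | x :: xs, t, f => if t + x > 0 then pvGreedy xs (t + x) (f + (t + x)) else f

-- mathematical weighted suffix value: pvWm l = Σ (j+1) * l[j]
def pvWm : List Int → Int
  | [] => 0
  | x :: xs => x + pvWm xs + xs.sum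

-- maximum of pvWm over all suffixes (including the empty one, value 0)
def pvRmax : List Int → Int
  | [] => 0
  | x :: xs => max (pvWm (x :: xs)) (pvRmax xs)

-- list of all cut values, as a running max M and final value G of the greedy sums
def pvM : List Int → Int → Int → Int
  | [], _, f => f
  | x :: xs, t, f => max f (pvM xs (t + x) (f + (t + x)))

def pvG : List Int → Int → Int → Int
  | [], _, f => f
  | x :: xs, t, f => pvG xs (t + x) (f + (t + x))

theorem pvWLoop_go (l : List Int) : ∀ (s t : Int),
    (PySem.List.enumerate l s).foldl (fun t jv => t + (jv.1 + 1) * jv.2) t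
      = t + pvWm l + s * l.sum := by
  induction l with
  | nil => intro s t; simp [PySem.List.enumerate_nil, pvWm]
  | cons x xs ih =>
      intro s t
      rw [PySem.List.enumerate_cons]
      simp only [List.foldl_cons]
      rw [ih (s + 1) (t + (s + 1) * x)]
      simp [pvWm, List.sum_cons]; ring

theorem pvWLoop_eq (l : List Int) : pvWLoop l = pvWm l := by
  have := pvWLoop_go l 0 0
  simp [pvWLoop] at this ⊢
  simpa using this

theorem pvRmax_nonneg (l : List Int) : 0 ≤ pvRmax l := by
  induction l with
  | nil => simp [pvRmax]
  | cons x xs ih => simp [pvRmax]; right; exact ih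

theorem pvM_ge (r : List Int) : ∀ t f, f ≤ pvM r t f := by
  induction r with
  | nil => intro t f; simp [pvM]
  | cons x xs ih => intro t f; simp [pvM]

theorem pvM_nonpos (r : List Int) : ∀ t f, (∀ y ∈ r, y ≤ 0) → t ≤ 0 → pvM r t f ≤ f := by
  induction r with
  | nil => intro t f _ _; simp [pvM]
  | cons x xs ih =>
      intro t f hmem ht
      have hx : x ≤ 0 := hmem x (by simp)
      have h1 : pvM xs (t + x) (f + (t + x)) ≤ f + (t + x) :=
        ih (t + x) (f + (t + x)) (fun y hy => hmem y (by simp [hy])) (by omega)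
      simp only [pvM]
      omega

theorem pvGreedy_eq_pvM (r : List Int) (hs : r.Pairwise (· ≥ ·)) :
    ∀ t f, 0 ≤ t → pvGreedy r t f = pvM r t f := by
  induction r with
  | nil => intro t f _; rfl
  | cons x xs ih =>
      intro t f ht
      rcases List.pairwise_cons.mp hs with ⟨hx, hxs⟩
      by_cases h : t + x > 0
      · have := ih hxs (t + x) (f + (t + x)) (by omega)
        have hge : f ≤ pvM xs (t + x) (f + (t + x)) :=
          le_trans (by omega) (pvM_ge xs (t + x) (f + (t + x)))
        simp only [pvGreedy, pvM, if_pos h, this]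
        omega
      · have hxle : x ≤ 0 := by omega
        have h1 : pvM xs (t + x) (f + (t + x)) ≤ f + (t + x) :=
          pvM_nonpos xs (t + x) (f + (t + x)) (fun y hy => le_trans (hx y hy) hxle) (by omega)
        simp only [pvGreedy, pvM, if_neg h]
        omega

theorem pvG_append (r : List Int) (a : Int) : ∀ t f,
    pvG (r ++ [a]) t f = pvG r t f + (t + r.sum) + a := by
  induction r with
  | nil => intro t f; simp [pvG]; ring
  | cons x xs ih =>
      intro t f
      simp only [List.cons_append, pvG, ih (t + x) (f + (t + x)), List.sum_cons]
      ring

theorem pvM_append (r : List Int) (a : Int) : ∀ t f,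
    pvM (r ++ [a]) t f = max (pvM r t f) (pvG r t f + (t + r.sum) + a) := by
  induction r with
  | nil => intro t f; simp only [List.nil_append, pvM, pvG, List.sum_nil]; omega
  | cons x xs ih =>
      intro t f
      simp only [List.cons_append, pvM, pvG, ih (t + x) (f + (t + x)), List.sum_cons]
      rw [← max_assoc]
      ring_nf

theorem pvG_rev (l : List Int) : pvG l.reverse 0 0 = pvWm l := by
  induction l with
  | nil => rfl
  | cons a l ih =>
      simp only [List.reverse_cons, pvG_append, ih, List.sum_reverse, pvWm]
      ring

theorem pvM_rev (l : List Int) : pvM l.reverse 0 0 = pvRmax l := by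
  induction l with
  | nil => rfl
  | cons a l ih =>
      simp only [List.reverse_cons, pvM_append, ih, pvG_rev, List.sum_reverse, pvRmax, pvWm]
      rw [max_comm]
      ring_nf

-- A's indexed countdown loop is the structural greedy over the reversed prefix
theorem pvALoop_eq_greedy (s : List Int) : ∀ (a : Nat), a ≤ s.length → ∀ t f,
    pvALoop s (PySem.List.pyRange ((a : Int) - 1) (-1) (-1)) t f
      = pvGreedy ((s.take a).reverse) t f := by
  intro a
  induction a with
  | zero =>
      intro _ t f
      rw [PySem.List.pyRange_neg_one_eq_nil (by omega)]
      rfl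
  | succ a ih =>
      intro ha t f
      have hlt : a < s.length := by omega
      rw [show ((a + 1 : Nat) : Int) - 1 = (a : Int) by push_cast; ring]
      rw [PySem.List.pyRange_neg_one_cons (by omega)]
      have hget : PySem.List.pyGetD s ((a : Nat) : Int) 0 = s[a] := by
        rw [PySem.List.pyGetD_natCast]
        exact List.getD_eq_getElem s 0 hlt
      have htake : (s.take (a + 1)).reverse = s[a] :: (s.take a).reverse := by
        rw [List.take_add_one]
        simp [List.getElem?_eq_getElem hlt]
      rw [htake]
      simp only [pvALoop, pvGreedy, hget]
      split_ifs with h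
      · exact ih (by omega) (t + s[a]) (f + (t + s[a]))
      · rfl

-- B's indexed loop from position i is the running max over the suffixes of drop i
theorem pvBfold (l : List Int) : ∀ (d : List Int) (i : Nat) (b : Int), d = l.drop i → 0 ≤ b →
    (PySem.List.pyRange (i : Int) (l.length : Int) 1).foldl
      (fun best j =>
        let t := pvWLoop (PySem.List.slice l (some j) none)
        if t > best then t else best) b
      = max b (pvRmax d) := by
  intro d
  induction d with
  | nil =>
      intro i b hd hb
      have : l.length ≤ i := by
        have := List.drop_eq_nil_iff.mp hd.symm
        omega
      rw [PySem.List.pyRange_one_eq_nil (by omega)]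
      simp only [List.foldl_nil, pvRmax]
      omega
  | cons x xs ih =>
      intro i b hd hb
      have hlt : i < l.length := by
        by_contra h
        rw [List.drop_eq_nil_iff.mpr (by omega)] at hd
        exact List.cons_ne_nil x xs hd
      rw [PySem.List.pyRange_one_cons (by omega)]
      simp only [List.foldl_cons]
      have hslice : PySem.List.slice l (some ((i : Nat) : Int)) none = l.drop i :=
        PySem.List.slice_from_natCast l i
      have hdrop : xs = l.drop (i + 1) := by
        have h := List.tail_drop (l := l) (i := i)
        rw [← hd] at h
        simpa using h
      have hstep :
          (if pvWLoop (PySem.List.slice l (some ((i : Nat) : Int)) none) > b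
            then pvWLoop (PySem.List.slice l (some ((i : Nat) : Int)) none) else b)
            = max b (pvWm (x :: xs)) := by
        rw [hslice, ← hd, pvWLoop_eq]
        omega
      have hcast : ((i : Nat) : Int) + 1 = (((i + 1 : Nat)) : Int) := by push_cast; ring
      simp only [hstep]
      rw [hcast, ih (i + 1) (max b (pvWm (x :: xs))) hdrop (by omega)]
      simp only [pvRmax]
      omega

-- ===== VERDICT (by name: the statement is the Claim_ definition above) =====
theorem maxSatisfaction_spec : Claim_equal_maxSatisfaction := by
  intro satisfaction _
  unfold Spec_maxSatisfaction maxSatisfaction maxSatisfaction_alt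
  set s := PySem.List.sorted satisfaction (fun x => x) false with hs
  have hA : pvALoop s (PySem.List.pyRange ((s.length : Int) - 1) (-1) (-1)) 0 0
      = pvGreedy s.reverse 0 0 := by
    have := pvALoop_eq_greedy s s.length (le_refl _) 0 0
    rwa [List.take_length] at this
  have hpair : s.reverse.Pairwise (· ≥ ·) := by
    rw [List.pairwise_reverse]
    exact PySem.List.sorted_pairwise satisfaction (fun x => x)
  have hB : (PySem.List.pyRange 0 (s.length : Int) 1).foldl
      (fun best i =>
        let t := pvWLoop (PySem.List.slice s (some i) none)
        if t > best then t else best) 0 = pvRmax s := by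
    have := pvBfold s s 0 0 (by simp) (le_refl 0)
    simp only [Nat.cast_zero] at this
    rw [this]
    have := pvRmax_nonneg s
    omega
  simp only [hA, hB, pvGreedy_eq_pvM s.reverse hpair 0 0 (le_refl 0), pvM_rev]
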